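-- pv_equiv track=rewrite | github.com/shaaista/kebo | services/conversation_memory_service.py | _looks_like_correction
-- ===== SOURCE A (Python) =====
-- def _looks_like_correction(msg_lower: str) -> bool:
--     correction_markers = (
--         "change",
--         "changed",
--         "update",
--         "updated",
--         "instead",
--         "actually",
--         "correction",
--         "make it",
--         "reschedule",
--     )
--     return any(marker in msg_lower for marker in correction_markers)
-- ===== SOURCE B (Python) =====
-- def _looks_like_correction(msg_lower: str) -> bool:
--     # Single left-to-right scan: at each position test whether a marker starts there.
--     # "changed"/"updated" are omitted: any occurrence of them is already an
--     # occurrence of "change"/"update", so the result is identical.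
--     markers = (
--         "change",
--         "update",
--         "instead",
--         "actually",
--         "correction",
--         "make it",
--         "reschedule",
--     )
--     for i in range(len(msg_lower)):
--         for m in markers:
--             if msg_lower.startswith(m, i):
--                 return True
--     return False
-- ===== Notes on version B (the rewrite author's own statement) =====
-- stated objective: alternative
-- what changed: Replaces nine independent whole-string substring searches with one left-to-right scan that tests each position for a marker prefix, after dropping the two markers (changed, updated) subsumed as extensions of change/update.
import Mathlib
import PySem

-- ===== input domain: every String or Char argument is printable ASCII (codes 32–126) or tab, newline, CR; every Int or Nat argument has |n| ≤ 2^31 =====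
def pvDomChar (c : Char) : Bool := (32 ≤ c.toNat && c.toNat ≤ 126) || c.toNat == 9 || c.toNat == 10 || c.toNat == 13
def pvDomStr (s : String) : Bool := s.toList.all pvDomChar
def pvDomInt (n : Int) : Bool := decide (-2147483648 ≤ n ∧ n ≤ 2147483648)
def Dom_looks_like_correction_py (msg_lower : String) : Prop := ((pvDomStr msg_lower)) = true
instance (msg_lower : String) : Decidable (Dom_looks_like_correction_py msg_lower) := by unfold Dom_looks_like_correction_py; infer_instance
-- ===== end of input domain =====

-- B replaces nine independent substring searches with one positional left-to-right scan
-- over seven markers (the two prefix-subsumed ones dropped); alternative structure, same cost class.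

-- ===== PORT A =====
def looks_like_correction_py (msg_lower : String) : Bool :=
  ["change", "changed", "update", "updated", "instead", "actually", "correction",
   "make it", "reschedule"].any (fun marker => PySem.Str.isIn marker msg_lower)

-- ===== PORT B =====
def altMarkers : List String :=
  ["change", "update", "instead", "actually", "correction", "make it", "reschedule"]

-- the scan of Source B: walk the suffixes (positions), at each test the marker prefixes
def altScan : List Char → Bool
  | [] => false
  | c :: rest =>
      (altMarkers.any fun m => PySem.Chars.startswith (c :: rest) m.toList) || altScan rest

def looks_like_correction_py_alt (msg_lower : String) : Bool :=
  altScan msg_lower.toList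

-- ===== PRECONDITION & SPEC =====
def Spec_looks_like_correction_py (msg_lower : String) (out : Bool) : Prop := out = looks_like_correction_py_alt msg_lower
instance (msg_lower : String) (out : Bool) : Decidable (Spec_looks_like_correction_py msg_lower out) := by unfold Spec_looks_like_correction_py; infer_instance

-- ===== CLAIM (what is proved, stated in full; the proofs are below) =====
def Claim_equal_looks_like_correction_py : Prop := ∀ (msg_lower : String), Dom_looks_like_correction_py msg_lower → Spec_looks_like_correction_py msg_lower (looks_like_correction_py msg_lower)

-- ===== LEMMAS AND PROOFS =====

-- altScan finds exactly: some marker is an infix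
theorem altScan_iff (cs : List Char) :
    altScan cs = true ↔ ∃ m ∈ altMarkers, m.toList <:+: cs := by
  induction cs with
  | nil =>
      constructor
      · intro h; simp [altScan] at h
      · rintro ⟨m, hm, hinf⟩
        have : m.toList = [] := List.eq_nil_of_infix_nil hinf
        fin_cases hm <;> simp_all
  | cons c rest ih =>
      simp only [altScan, Bool.or_eq_true, List.any_eq_true, ih,
        PySem.Chars.startswith_iff]
      constructor
      · rintro (⟨m, hm, hp⟩ | ⟨m, hm, hi⟩)
        · exact ⟨m, hm, hp.isInfix⟩
        · exact ⟨m, hm, hi.trans (List.suffix_cons c rest).isInfix⟩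
      · rintro ⟨m, hm, hi⟩
        rcases List.infix_cons_iff.mp hi with hp | hi'
        · exact Or.inl ⟨m, hm, hp⟩
        · exact Or.inr ⟨m, hm, hi'⟩

-- "changed"/"updated" occurrences are already "change"/"update" occurrences
theorem nine_iff_seven (cs : List Char) :
    (∃ m ∈ (["change", "changed", "update", "updated", "instead", "actually",
             "correction", "make it", "reschedule"] : List String), m.toList <:+: cs)
      ↔ ∃ m ∈ altMarkers, m.toList <:+: cs := by
  constructor
  · rintro ⟨m, hm, hi⟩
    fin_cases hm
    · exact ⟨"change", by simp [altMarkers], hi⟩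
    · exact ⟨"change", by simp [altMarkers],
        ((by decide : ("change".toList) <+: ("changed".toList)).isInfix).trans hi⟩
    · exact ⟨"update", by simp [altMarkers], hi⟩
    · exact ⟨"update", by simp [altMarkers],
        ((by decide : ("update".toList) <+: ("updated".toList)).isInfix).trans hi⟩
    · exact ⟨"instead", by simp [altMarkers], hi⟩
    · exact ⟨"actually", by simp [altMarkers], hi⟩
    · exact ⟨"correction", by simp [altMarkers], hi⟩
    · exact ⟨"make it", by simp [altMarkers], hi⟩
    · exact ⟨"reschedule", by simp [altMarkers], hi⟩
  · rintro ⟨m, hm, hi⟩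
    fin_cases hm
    · exact ⟨"change", by simp, hi⟩
    · exact ⟨"update", by simp, hi⟩
    · exact ⟨"instead", by simp, hi⟩
    · exact ⟨"actually", by simp, hi⟩
    · exact ⟨"correction", by simp, hi⟩
    · exact ⟨"make it", by simp, hi⟩
    · exact ⟨"reschedule", by simp, hi⟩

-- ===== VERDICT (by name: the statement is the Claim_ definition above) =====
theorem looks_like_correction_py_spec : Claim_equal_looks_like_correction_py := by
  intro s _
  unfold Spec_looks_like_correction_py looks_like_correction_py looks_like_correction_py_alt
  rw [Bool.eq_iff_iff, altScan_iff]
  simp only [List.any_eq_true, PySem.Str.isIn_iff_infix]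
  exact nine_iff_seven s.toList
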